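-- pv_equiv track=rewrite | github.com/JBRS307/WDI | list3/zad16.py | oneMin
-- ===== SOURCE A (Python) =====
-- def oneMin(arr, n):
--     mini = arr[0]
--     flag = True
--
--     for i in range(1, n):
--         if arr[i] < mini:
--             mini = arr[i]
--             flag = True
--         elif arr[i] == mini:
--             flag = False
--
--     return flag
-- ===== SOURCE B (Python) =====
-- def oneMin(arr, n):
--     # Pass 1: find the minimum of arr[0..n-1] (seeded by arr[0], like A).
--     mini = arr[0]
--     for i in range(1, n):
--         if arr[i] < mini:
--             mini = arr[i]
--     # Pass 2: count occurrences of that minimum.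
--     count = 0
--     for i in range(n):
--         if arr[i] == mini:
--             count += 1
--     return count <= 1
-- ===== Notes on version B (the rewrite author's own statement) =====
-- stated objective: alternative
-- what changed: A keeps a uniqueness flag that is reset/cleared while scanning once; B decomposes the task into two plain passes: find the minimum, then count its occurrences and return count <= 1.
import Mathlib
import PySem

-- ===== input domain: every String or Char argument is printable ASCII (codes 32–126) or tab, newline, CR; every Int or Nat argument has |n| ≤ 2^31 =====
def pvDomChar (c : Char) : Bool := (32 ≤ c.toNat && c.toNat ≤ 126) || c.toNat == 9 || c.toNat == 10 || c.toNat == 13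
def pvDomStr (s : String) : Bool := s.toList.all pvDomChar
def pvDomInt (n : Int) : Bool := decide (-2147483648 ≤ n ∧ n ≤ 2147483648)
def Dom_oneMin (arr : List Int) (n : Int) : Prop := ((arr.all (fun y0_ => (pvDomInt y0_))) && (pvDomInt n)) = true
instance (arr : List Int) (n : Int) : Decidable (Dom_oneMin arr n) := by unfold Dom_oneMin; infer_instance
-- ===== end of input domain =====

-- B replaces A's single scan with a reset/cleared uniqueness flag by two plain passes
-- (find the minimum, then count it); alternative decomposition, same cost.

-- ===== PORT A =====
def oneMin (arr : List Int) (n : Int) : Bool :=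
  ((PySem.List.pyRange 1 n).foldl
    (fun (s : Int × Bool) i =>
      if PySem.List.pyGetD arr i 0 < s.1 then (PySem.List.pyGetD arr i 0, true)
      else if PySem.List.pyGetD arr i 0 = s.1 then (s.1, false)
      else s)
    (PySem.List.pyGetD arr 0 0, true)).2

-- ===== PORT B =====
def oneMin_alt (arr : List Int) (n : Int) : Bool :=
  let mini := (PySem.List.pyRange 1 n).foldl
    (fun m i => if PySem.List.pyGetD arr i 0 < m then PySem.List.pyGetD arr i 0 else m)
    (PySem.List.pyGetD arr 0 0)
  let count := (PySem.List.pyRange 0 n).foldl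
    (fun (c : Int) i => if PySem.List.pyGetD arr i 0 = mini then c + 1 else c) (0 : Int)
  decide (count ≤ 1)

-- ===== PRECONDITION & SPEC =====
-- Pre_: arr[0] raises IndexError on the empty list, and arr[i] raises when n exceeds len(arr).
def Pre_oneMin (arr : List Int) (n : Int) : Prop := arr ≠ [] ∧ n ≤ (arr.length : Int)
instance (arr : List Int) (n : Int) : Decidable (Pre_oneMin arr n) := by unfold Pre_oneMin; infer_instance
def pvWitness_oneMin : List Int × Int := ([3, 1, 2], 3)
def Spec_oneMin (arr : List Int) (n : Int) (out : Bool) : Prop := out = oneMin_alt arr n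
instance (arr : List Int) (n : Int) (out : Bool) : Decidable (Spec_oneMin arr n out) := by unfold Spec_oneMin; infer_instance

-- ===== CLAIM (what is proved, stated in full; the proofs are below) =====
def Claim_equal_oneMin : Prop := ∀ (arr : List Int) (n : Int), Dom_oneMin arr n → Pre_oneMin arr n → Spec_oneMin arr n (oneMin arr n)

-- ===== LEMMAS AND PROOFS =====

-- foldl-min over a list with a seed (the value both ports' first scan computes)
def fmin (x : Int) (q : List Int) : Int :=
  q.foldl (fun m y => if y < m then y else m) x

theorem fmin_snoc (x y : Int) (q : List Int) :
    fmin x (q ++ [y]) = if y < fmin x q then y else fmin x q := by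
  simp [fmin]

theorem fmin_le (q : List Int) : ∀ (x z : Int), z ∈ x :: q → fmin x q ≤ z := by
  induction q with
  | nil => intro x z hz; simp at hz; simp [fmin, hz]
  | cons a q ih =>
    intro x z hz
    have h1 : fmin x (a :: q) = fmin (if a < x then a else x) q := by simp [fmin]
    have hself : fmin (if a < x then a else x) q ≤ (if a < x then a else x) :=
      ih (if a < x then a else x) _ (by simp)
    have hx : (if a < x then a else x) ≤ x ∧ (if a < x then a else x) ≤ a := by
      split_ifs <;> omega
    rcases List.mem_cons.1 hz with rfl | hz
    · rw [h1]; omega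
    · rcases List.mem_cons.1 hz with rfl | hz
      · rw [h1]; omega
      · rw [h1]; exact ih (if a < x then a else x) z (List.mem_cons_of_mem _ hz)

theorem fmin_mem (q : List Int) : ∀ (x : Int), fmin x q ∈ x :: q := by
  induction q with
  | nil => intro x; simp [fmin]
  | cons a q ih =>
    intro x
    have h1 : fmin x (a :: q) = fmin (if a < x then a else x) q := by simp [fmin]
    have h2 := ih (if a < x then a else x)
    rw [h1]
    rcases List.mem_cons.1 h2 with h | h
    · rw [h]; split_ifs <;> simp
    · simp [h]

-- B's counting pass is the count of mini in the prefix
theorem count_foldl (m : Int) :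
    ∀ (t : List Int) (c : Int),
      t.foldl (fun c y => if y = m then c + 1 else c) c = c + (t.count m : Int) := by
  intro t
  induction t with
  | nil => intro c; simp
  | cons y t ih =>
    intro c
    by_cases h : y = m <;> simp [List.foldl_cons, h, ih] <;> omega

-- the invariant of A's single pass: the flag is "the current minimum occurs exactly once so far"
theorem keyA :
    ∀ (xs q : List Int) (x : Int),
      xs.foldl
        (fun (s : Int × Bool) y =>
          if y < s.1 then (y, true) else if y = s.1 then (s.1, false) else s)
        (fmin x q, decide ((x :: q).count (fmin x q) = 1))
      = (fmin x (q ++ xs), decide ((x :: (q ++ xs)).count (fmin x (q ++ xs)) = 1)) := by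
  intro xs
  induction xs with
  | nil => intro q x; simp
  | cons y xs ih =>
    intro q x
    have happ : (x :: (q ++ [y])) = (x :: q) ++ [y] := by simp
    have hstep :
        (if y < fmin x q then (y, true)
         else if y = fmin x q then (fmin x q, false)
         else (fmin x q, decide ((x :: q).count (fmin x q) = 1)))
        = (fmin x (q ++ [y]), decide ((x :: (q ++ [y])).count (fmin x (q ++ [y])) = 1)) := by
      rcases lt_trichotomy y (fmin x q) with h | h | h
      · -- strictly smaller: new unique minimum
        have hnotmem : y ∉ x :: q := by
          intro hy
          have := fmin_le q x y hy
          omega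
        have hcount : (x :: (q ++ [y])).count y = 1 := by
          rw [happ, List.count_append, List.count_eq_zero.2 hnotmem]
          simp
        rw [fmin_snoc, if_pos h, if_pos h, hcount]
        simp
      · -- equal: a duplicate of the current minimum
        have hmem : fmin x q ∈ x :: q := fmin_mem q x
        have hpos : 0 < (x :: q).count (fmin x q) := List.count_pos_iff.2 hmem
        have hfm : fmin x (q ++ [y]) = fmin x q := by
          rw [fmin_snoc, h]; simp
        have hcount : (x :: (q ++ [y])).count (fmin x q) = (x :: q).count (fmin x q) + 1 := by
          rw [happ, List.count_append, h]; simp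
        have hflag : ¬ ((x :: q).count (fmin x q) + 1 = 1) := by omega
        rw [hfm, hcount, h]
        simp
        omega
      · -- larger: nothing changes
        have hne : ¬ y = fmin x q := by omega
        have hnlt : ¬ y < fmin x q := by omega
        have hfm : fmin x (q ++ [y]) = fmin x q := by
          rw [fmin_snoc, if_neg hnlt]
        have hcount : (x :: (q ++ [y])).count (fmin x q) = (x :: q).count (fmin x q) := by
          rw [happ, List.count_append]
          simp [hne]
        rw [hfm, hcount, if_neg hnlt, if_neg hne]
    rw [List.foldl_cons, hstep, ih (q ++ [y]) x]
    simp

-- ===== VERDICT (by name: the statement is the Claim_ definition above) =====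
theorem oneMin_spec : Claim_equal_oneMin := by
  intro arr n _ hpre
  obtain ⟨hne, hlen⟩ := hpre
  simp only [Spec_oneMin, oneMin, oneMin_alt]
  by_cases hn0 : n ≤ 0
  · -- empty ranges (range(1,0) is also empty): A gives the initial flag True, B counts 0
    rw [PySem.List.pyRange_one_eq_nil (by omega : n ≤ (1:Int)),
        PySem.List.pyRange_one_eq_nil (by omega : n ≤ (0:Int))]
    simp
  · have hn : 0 < n := by omega
    obtain ⟨a, as, rfl⟩ := List.exists_cons_of_ne_nil hne
    set arr := a :: as with harr
    -- restrict attention to the prefix t = arr.take n.toNat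
    set t := arr.take n.toNat with ht
    have hlt : t.length = n.toNat := by
      rw [ht, List.length_take]
      omega
    have hti0 : ∀ (i : Int), 0 ≤ i → i < n → PySem.List.pyGetD arr i 0 = PySem.List.pyGetD t i 0 := by
      intro i h0 h2
      have hia : i < (arr.length : Int) := by omega
      have hit : i < (t.length : Int) := by omega
      rw [PySem.List.pyGetD_eq_getElem arr 0 h0 hia,
          PySem.List.pyGetD_eq_getElem t 0 h0 hit]
      simp [ht, List.getElem_take]
    have hn' : n = (t.length : Int) := by omega
    -- t is a nonempty prefix starting at arr[0]
    have htcons : t = a :: as.take (n.toNat - 1) := by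
      rw [ht, harr]
      have hsucc : n.toNat = (n.toNat - 1) + 1 := by omega
      rw [hsucc, List.take_succ_cons]
      simp
    have hget0 : PySem.List.pyGetD arr 0 0 = a := by
      rw [harr]; exact PySem.List.pyGetD_zero_cons a as 0
    -- A's loop as a fold over t.drop 1
    have hA :
        (PySem.List.pyRange 1 n).foldl
          (fun (s : Int × Bool) i =>
            if PySem.List.pyGetD arr i 0 < s.1 then (PySem.List.pyGetD arr i 0, true)
            else if PySem.List.pyGetD arr i 0 = s.1 then (s.1, false) else s)
          (PySem.List.pyGetD arr 0 0, true)
        = (t.drop 1).foldl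
            (fun (s : Int × Bool) y =>
              if y < s.1 then (y, true) else if y = s.1 then (s.1, false) else s)
            (a, true) := by
      rw [hget0, hn']
      rw [PySem.List.foldl_congr_mem _ _
        (fun (s : Int × Bool) i =>
          if PySem.List.pyGetD t i 0 < s.1 then (PySem.List.pyGetD t i 0, true)
          else if PySem.List.pyGetD t i 0 = s.1 then (s.1, false) else s) _
        (by
          intro acc i hi
          have hmem := (PySem.List.mem_pyRange_one).1 hi
          rw [hti0 i (by omega) (by omega)])]
      exact PySem.List.foldl_pyRange_pyGetD' t 0
        (fun (s : Int × Bool) y =>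
          if y < s.1 then (y, true) else if y = s.1 then (s.1, false) else s)
        (a, true) (by omega)
    -- B's first loop likewise
    have hB1 :
        (PySem.List.pyRange 1 n).foldl
          (fun m i => if PySem.List.pyGetD arr i 0 < m then PySem.List.pyGetD arr i 0 else m)
          (PySem.List.pyGetD arr 0 0)
        = fmin a (t.drop 1) := by
      rw [hget0, hn']
      rw [PySem.List.foldl_congr_mem _ _
        (fun (m : Int) i => if PySem.List.pyGetD t i 0 < m then PySem.List.pyGetD t i 0 else m) _
        (by
          intro acc i hi
          have hmem := (PySem.List.mem_pyRange_one).1 hi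
          rw [hti0 i (by omega) (by omega)])]
      exact PySem.List.foldl_pyRange_pyGetD' t 0
        (fun (m : Int) y => if y < m then y else m) a (by omega)
    -- B's second loop counts over all of t
    have hB2 : ∀ (m : Int),
        (PySem.List.pyRange 0 n).foldl
          (fun (c : Int) i => if PySem.List.pyGetD arr i 0 = m then c + 1 else c) (0 : Int)
        = (t.count m : Int) := by
      intro m
      rw [hn']
      rw [PySem.List.foldl_congr_mem _ _
        (fun (c : Int) i => if PySem.List.pyGetD t i 0 = m then c + 1 else c) _
        (by
          intro acc i hi
          have hmem := (PySem.List.mem_pyRange_one).1 hi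
          rw [hti0 i (by omega) (by omega)])]
      have hfold := PySem.List.foldl_pyRange_pyGetD' t 0
        (fun (c : Int) y => if y = m then c + 1 else c) (0 : Int) (by omega : (0:Int) ≤ 0)
      rw [hfold]
      simp [count_foldl m t 0]
    -- assemble
    rw [hA, hB1, hB2]
    set xs := t.drop 1 with hxs
    have htx : t = a :: xs := by rw [hxs, htcons]; rfl
    -- A's fold via the invariant, starting from the canonical state of the prefix [a]
    have h0 : fmin a ([] : List Int) = a := by simp [fmin]
    have hkey' :
        xs.foldl
          (fun (s : Int × Bool) y =>
            if y < s.1 then (y, true) else if y = s.1 then (s.1, false) else s)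
          (a, true)
        = (fmin a xs, decide ((a :: xs).count (fmin a xs) = 1)) := by
      calc xs.foldl
            (fun (s : Int × Bool) y =>
              if y < s.1 then (y, true) else if y = s.1 then (s.1, false) else s)
            (a, true)
          = xs.foldl
              (fun (s : Int × Bool) y =>
                if y < s.1 then (y, true) else if y = s.1 then (s.1, false) else s)
              (fmin a [], decide ((a :: ([] : List Int)).count (fmin a []) = 1)) := by
            rw [h0]; simp
        _ = _ := by rw [keyA xs [] a]; simp
    rw [hkey', htx]
    have hmem : fmin a xs ∈ a :: xs := fmin_mem xs a
    have hpos : 0 < (a :: xs).count (fmin a xs) := List.count_pos_iff.2 hmem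
    by_cases hone : (a :: xs).count (fmin a xs) = 1
    · simp [hone]
    · have hgt : ¬ ((a :: xs).count (fmin a xs) : Int) ≤ 1 := by
        push_cast; omega
      simp [hone, hgt]
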